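-- pv_equiv track=rewrite | github.com/Austin-Myles/TTPS-TyE | Soluciones/Numeros/10139.py | divides_or_not
-- ===== SOURCE A (Python) =====
-- from math import sqrt
--
-- def factoriza(m):
--     factores = {}
--     for i in range(2, int(sqrt(m)) + 1):
--         while m % i == 0:
--             if i in factores:
--                 factores[i] += 1
--             else:
--                 factores[i] = 1
--             m //= i
--     if m > 1:
--         factores[m] = 1
--     return factores
--
-- def divides_or_not(n, m):
--     if m == 0:
--         return (f"{m} does not divide {n}!")
--     if m == 1:
--         return (f"{m} divides {n}!")
--
--     factores = factoriza(m)
--     for p, count in factores.items():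
--         potencia_p = 0
--         potencia = p
--         while potencia <= n:
--             potencia_p += n // potencia
--             potencia *= p
--         if potencia_p < count:
--             return (f"{m} does not divide {n}!")
--
--     return (f"{m} divides {n}!")
-- ===== SOURCE B (Python) =====
-- from math import gcd
--
-- def divides_or_not(n, m):
--     if m == 0:
--         return f"{m} does not divide {n}!"
--     if m == 1:
--         return f"{m} divides {n}!"
--     # gcd sweep: after processing k = 2..n, remaining == m // gcd(m, k!),
--     # so remaining == 1 exactly when m divides n!.
--     remaining = m
--     for k in range(2, n + 1):
--         remaining //= gcd(remaining, k)
--         if remaining == 1: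
--             break
--     if remaining == 1:
--         return f"{m} divides {n}!"
--     return f"{m} does not divide {n}!"
-- ===== Notes on version B (the rewrite author's own statement) =====
-- stated objective: simpler
-- what changed: B drops A's prime factorization and Legendre power-counting entirely: it decides m | n! by a single gcd sweep (remaining //= gcd(remaining, k) for k = 2..n with early exit), which maintains remaining = m // gcd(m, k!).
import Mathlib
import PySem

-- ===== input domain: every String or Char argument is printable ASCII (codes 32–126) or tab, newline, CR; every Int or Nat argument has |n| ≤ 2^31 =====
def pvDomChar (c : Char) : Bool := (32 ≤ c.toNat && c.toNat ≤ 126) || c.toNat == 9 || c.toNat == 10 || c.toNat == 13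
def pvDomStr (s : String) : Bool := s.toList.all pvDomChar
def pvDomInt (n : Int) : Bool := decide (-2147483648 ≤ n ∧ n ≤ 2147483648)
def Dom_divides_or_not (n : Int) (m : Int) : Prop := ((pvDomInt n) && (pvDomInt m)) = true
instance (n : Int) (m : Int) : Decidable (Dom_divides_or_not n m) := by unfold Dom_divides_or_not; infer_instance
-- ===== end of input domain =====

-- B drops A's prime factorization + Legendre power counting and decides m | n! by a single
-- gcd sweep (remaining //= gcd(remaining, k) for k = 2..n, early exit at 1); return value only.

-- termination helper cited by the ports' decreasing_by
theorem pvFdivLt (m i : Int) (hi : 2 ≤ i) (hm : 0 < m) :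
    (PySem.Int.floordiv m i).toNat < m.toNat := by
  have h1 : PySem.Int.floordiv m i < m := by
    rw [PySem.Int.floordiv_lt_iff_lt_mul (by omega)]; nlinarith
  have h2 : 0 ≤ PySem.Int.floordiv m i := by
    rw [PySem.Int.floordiv_eq_ediv_of_pos (by omega)]
    exact Int.ediv_nonneg (by omega) (by omega)
  omega

-- ===== PORT A =====

-- int(sqrt(m)) ported as the integer square root: exact for 0 ≤ m ≤ 2^31 (float sqrt of such m
-- never rounds across an integer boundary); m < 0 raises ValueError → excluded by Pre_.
def pyIntSqrt (m : Int) : Int := Int.ofNat (Nat.sqrt m.toNat)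

-- 'while m % i == 0:' body of factoriza; the '2 ≤ i ∧ 0 < m' guard only makes the recursion total
-- (every call site has 2 ≤ i, and m stays ≥ 1 there, so the guard never changes the computed value).
def facWhile (i : Int) (d : PySem.Dict Int Int) (m : Int) : PySem.Dict Int Int × Int :=
  if h : 2 ≤ i ∧ 0 < m ∧ PySem.Int.mod m i = 0 then
    let d' := if d.contains i then d.insert i (d.getD i 0 + 1) else d.insert i 1
    facWhile i d' (PySem.Int.floordiv m i)
  else (d, m)
termination_by m.toNat
decreasing_by exact pvFdivLt m i h.1 h.2.1

def factoriza (m : Int) : PySem.Dict Int Int :=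
  let st := (PySem.List.pyRange 2 (pyIntSqrt m + 1)).foldl
      (fun st i => facWhile i st.1 st.2) (PySem.Dict.empty, m)
  if 1 < st.2 then st.1.insert st.2 1 else st.1

-- 'while potencia <= n:' — the '2 ≤ p ∧ 1 ≤ pot' guard only makes the recursion total
-- (every call has p = pot ≥ 2, where it never changes the computed value).
def legA (n p pot : Int) : Int :=
  if h : 2 ≤ p ∧ 1 ≤ pot ∧ pot ≤ n then PySem.Int.floordiv n pot + legA n p (pot * p) else 0
termination_by (n + 1 - pot).toNat
decreasing_by
  have h2 : pot * 2 ≤ pot * p := by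
    exact mul_le_mul_of_nonneg_left h.1 (by omega)
  omega

-- 'for p, count in factores.items():' with its early return
def checkA (n m : Int) : List (Int × Int) → String
  | [] => PySem.Int.toStr m ++ " divides " ++ PySem.Int.toStr n ++ "!"
  | (p, c) :: rest =>
      if legA n p p < c then PySem.Int.toStr m ++ " does not divide " ++ PySem.Int.toStr n ++ "!"
      else checkA n m rest

def divides_or_not (n : Int) (m : Int) : String :=
  if m = 0 then PySem.Int.toStr m ++ " does not divide " ++ PySem.Int.toStr n ++ "!"
  else if m = 1 then PySem.Int.toStr m ++ " divides " ++ PySem.Int.toStr n ++ "!"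
  else checkA n m (factoriza m).items

-- ===== PORT B =====

-- 'for k in range(2, n+1): remaining //= gcd(remaining, k); if remaining == 1: break'
-- (range is lazy and the loop breaks early, so the port counts k up instead of materialising
-- the list); math.gcd = Int.gcd (gcd of absolute values, nonnegative).
def bSweep (stop k r : Int) : Int :=
  if h : k < stop then
    let r' := PySem.Int.floordiv r (Int.gcd r k)
    if r' = 1 then r' else bSweep stop (k + 1) r'
  else r
termination_by (stop - k).toNat
decreasing_by omega

def divides_or_not_alt (n : Int) (m : Int) : String :=
  if m = 0 then PySem.Int.toStr m ++ " does not divide " ++ PySem.Int.toStr n ++ "!"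
  else if m = 1 then PySem.Int.toStr m ++ " divides " ++ PySem.Int.toStr n ++ "!"
  else
    if bSweep (n + 1) 2 m = 1 then
      PySem.Int.toStr m ++ " divides " ++ PySem.Int.toStr n ++ "!"
    else PySem.Int.toStr m ++ " does not divide " ++ PySem.Int.toStr n ++ "!"

-- ===== PRECONDITION & SPEC =====
-- A raises ValueError on m < 0 (math.sqrt of a negative); Pre_ excludes exactly those inputs.
def Pre_divides_or_not (n : Int) (m : Int) : Prop := 0 ≤ m
instance (n : Int) (m : Int) : Decidable (Pre_divides_or_not n m) := by
  unfold Pre_divides_or_not; infer_instance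

def pvWitness_divides_or_not : Int × Int := (10, 12)

def Spec_divides_or_not (n : Int) (m : Int) (out : String) : Prop := out = divides_or_not_alt n m
instance (n : Int) (m : Int) (out : String) : Decidable (Spec_divides_or_not n m out) := by
  unfold Spec_divides_or_not; infer_instance

-- ===== CLAIM (what is proved, stated in full; the proofs are below) =====
def Claim_equal_divides_or_not : Prop := ∀ (n : Int) (m : Int), Dom_divides_or_not n m → Pre_divides_or_not n m → Spec_divides_or_not n m (divides_or_not n m)
-- ===== LEMMAS AND PROOFS =====

-- ---------- proof-side spec of A's inner while: (remaining value, multiplicity removed) ----------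
def divC (p m : Int) : Int × Int :=
  if h : 2 ≤ p ∧ 0 < m ∧ PySem.Int.mod m p = 0 then
    let r := divC p (PySem.Int.floordiv m p)
    (r.1, r.2 + 1)
  else (m, 0)
termination_by m.toNat
decreasing_by exact pvFdivLt m p h.1 h.2.1

def pairsOf : List Int → Int → List (Int × Int)
  | [], _ => []
  | p :: ps, rest =>
      (if 0 < (divC p rest).2 then [(p, (divC p rest).2)] else []) ++ pairsOf ps (divC p rest).1

def restOf : List Int → Int → Int
  | [], rest => rest
  | p :: ps, rest => restOf ps (divC p rest).1

-- the product of the recorded prime powers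
def prodPC : List (Int × Int) → Int
  | [] => 1
  | (p, c) :: rest => p ^ c.toNat * prodPC rest

theorem pvFdivMul {p m : Int} (hp : 2 ≤ p) (hd : p ∣ m) :
    PySem.Int.floordiv m p * p = m := by
  obtain ⟨k, hk⟩ := hd
  subst hk
  rw [PySem.Int.floordiv_eq_ediv_of_pos (by omega), Int.mul_ediv_cancel_left _ (by omega)]
  ring

theorem divC_eq_pos {p m : Int} (h : 2 ≤ p ∧ 0 < m ∧ PySem.Int.mod m p = 0) :
    divC p m = ((divC p (PySem.Int.floordiv m p)).1, (divC p (PySem.Int.floordiv m p)).2 + 1) := by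
  conv_lhs => rw [divC]
  rw [dif_pos h]

theorem divC_eq_neg {p m : Int} (h : ¬ (2 ≤ p ∧ 0 < m ∧ PySem.Int.mod m p = 0)) :
    divC p m = (m, 0) := by
  rw [divC, dif_neg h]

theorem divC_pos {p m : Int} (hm : 0 < m) : 0 < (divC p m).1 := by
  fun_induction divC p m with
  | case1 m h r ih =>
      show 0 < (divC p (PySem.Int.floordiv m p)).1
      apply ih
      have := pvFdivMul h.1 ((PySem.Int.mod_eq_zero_iff_dvd m p).1 h.2.2)
      nlinarith
  | case2 m h => simpa [divC_eq_neg h] using hm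

theorem divC_dvd {p m : Int} : (divC p m).1 ∣ m := by
  fun_induction divC p m with
  | case1 m h r ih =>
      have hmul := pvFdivMul h.1 ((PySem.Int.mod_eq_zero_iff_dvd m p).1 h.2.2)
      show (divC p (PySem.Int.floordiv m p)).1 ∣ m
      calc (divC p (PySem.Int.floordiv m p)).1 ∣ PySem.Int.floordiv m p := ih
        _ ∣ m := Dvd.intro_left p (by linarith [hmul])
  | case2 m h => exact dvd_refl m

theorem divC_not_dvd {p m : Int} (hp : 2 ≤ p) (hm : 0 < m) : ¬ p ∣ (divC p m).1 := by
  fun_induction divC p m with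
  | case1 m h r ih =>
      have hmul := pvFdivMul h.1 ((PySem.Int.mod_eq_zero_iff_dvd m p).1 h.2.2)
      have hpos : 0 < PySem.Int.floordiv m p := by nlinarith
      exact ih hpos
  | case2 m h =>
      show ¬ p ∣ (m, 0).1
      intro hdvd
      exact h ⟨hp, hm, (PySem.Int.mod_eq_zero_iff_dvd m p).2 hdvd⟩

theorem divC_snd_nonneg (p m : Int) : 0 ≤ (divC p m).2 := by
  fun_induction divC p m with
  | case1 m h r ih =>
      show 0 ≤ (divC p (PySem.Int.floordiv m p)).2 + 1
      omega
  | case2 m h => exact le_refl 0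

-- the removed multiplicity reassembles: p ^ c * rest' = rest
theorem divC_mul {p m : Int} (hp : 2 ≤ p) : p ^ (divC p m).2.toNat * (divC p m).1 = m := by
  fun_induction divC p m with
  | case1 m h r ih =>
      have hmul := pvFdivMul h.1 ((PySem.Int.mod_eq_zero_iff_dvd m p).1 h.2.2)
      have hnn := divC_snd_nonneg p (PySem.Int.floordiv m p)
      show p ^ ((divC p (PySem.Int.floordiv m p)).2 + 1).toNat *
        (divC p (PySem.Int.floordiv m p)).1 = m
      have : ((divC p (PySem.Int.floordiv m p)).2 + 1).toNat
          = (divC p (PySem.Int.floordiv m p)).2.toNat + 1 := by omega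
      rw [this, pow_succ]
      calc p ^ (divC p (PySem.Int.floordiv m p)).2.toNat * p *
        (divC p (PySem.Int.floordiv m p)).1
        = (p ^ (divC p (PySem.Int.floordiv m p)).2.toNat *
            (divC p (PySem.Int.floordiv m p)).1) * p := by ring
        _ = PySem.Int.floordiv m p * p := by rw [ih]
        _ = m := hmul
  | case2 m h => simp

theorem divC_dvd_self {p m : Int} (h : 0 < (divC p m).2) : p ∣ m := by
  by_cases hc : 2 ≤ p ∧ 0 < m ∧ PySem.Int.mod m p = 0
  · exact (PySem.Int.mod_eq_zero_iff_dvd m p).1 hc.2.2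
  · rw [divC_eq_neg hc] at h; omega

theorem divC_snd_zero {p m : Int} (h : (divC p m).2 = 0) : (divC p m).1 = m := by
  by_cases hc : 2 ≤ p ∧ 0 < m ∧ PySem.Int.mod m p = 0
  · rw [divC_eq_pos hc] at h ⊢
    have := divC_snd_nonneg p (PySem.Int.floordiv m p)
    omega
  · rw [divC_eq_neg hc]

-- ---------- A's inner while against divC (dict bookkeeping) ----------
theorem facWhile_insert (i : Int) (d : PySem.Dict Int Int) (m a : Int) :
    facWhile i (d.insert i a) m = (d.insert i (a + (divC i m).2), (divC i m).1) := by
  fun_induction divC i m generalizing a with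
  | case1 m h r ih =>
      rw [facWhile, dif_pos h]
      simp only [PySem.Dict.contains_insert_self, if_true, PySem.Dict.getD_insert_self,
        PySem.Dict.insert_insert_self]
      show _ = (d.insert i (a + ((divC i (PySem.Int.floordiv m i)).2 + 1)),
        (divC i (PySem.Int.floordiv m i)).1)
      rw [ih]
      congr 2
      ring
  | case2 m h =>
      rw [facWhile, dif_neg h]
      simp

theorem facWhile_spec (i : Int) (d : PySem.Dict Int Int) (m : Int)
    (hfresh : d.contains i = false) :
    facWhile i d m =
      (if 0 < (divC i m).2 then d.insert i (divC i m).2 else d, (divC i m).1) := by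
  by_cases h : 2 ≤ i ∧ 0 < m ∧ PySem.Int.mod m i = 0
  · rw [facWhile, dif_pos h, hfresh]
    simp only [Bool.false_eq_true, if_false]
    rw [facWhile_insert, divC_eq_pos h]
    have hnn := divC_snd_nonneg i (PySem.Int.floordiv m i)
    rw [if_pos (by omega)]
    congr 2
    ring
  · rw [facWhile, dif_neg h, divC_eq_neg h]
    simp

-- A's outer loop appends exactly the (factor, multiplicity) pairs of pairsOf, in order
theorem foldA (l : List Int) :
    ∀ (d : PySem.Dict Int Int) (rest : Int),
    (∀ p ∈ l, 2 ≤ p) → 0 < rest → l.Pairwise (· ≠ ·) →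
    (∀ p ∈ l, d.contains p = false) →
    (∀ q, d.contains q = true → ¬ q ∣ rest) →
    (l.foldl (fun st i => facWhile i st.1 st.2) (d, rest)).1.items = d.items ++ pairsOf l rest ∧
    (l.foldl (fun st i => facWhile i st.1 st.2) (d, rest)).2 = restOf l rest ∧
    (∀ q, (l.foldl (fun st i => facWhile i st.1 st.2) (d, rest)).1.contains q = true →
      ¬ q ∣ restOf l rest) := by
  induction l with
  | nil =>
      intro d rest _ _ _ _ hkeys
      exact ⟨by simp [pairsOf], rfl, fun q hq => hkeys q hq⟩
  | cons p ps ih =>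
      intro d rest hl2 hrest hnd hfresh hkeys
      have hp2 : 2 ≤ p := hl2 p (by simp)
      have hfp : d.contains p = false := hfresh p (by simp)
      have hr' : 0 < (divC p rest).1 := divC_pos hrest
      obtain ⟨hne, hnd'⟩ := List.pairwise_cons.1 hnd
      simp only [List.foldl_cons, facWhile_spec p d rest hfp]
      by_cases hc : 0 < (divC p rest).2
      · rw [if_pos hc]
        have hfresh' : ∀ q ∈ ps, ((d.insert p (divC p rest).2).contains q) = false := by
          intro q hq
          rw [PySem.Dict.contains_insert]
          have : q ≠ p := fun he => (hne q hq) he.symm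
          simp [this, hfresh q (by simp [hq])]
        have hkeys' : ∀ q, (d.insert p (divC p rest).2).contains q = true →
            ¬ q ∣ (divC p rest).1 := by
          intro q hq
          rw [PySem.Dict.contains_insert] at hq
          rcases Bool.or_eq_true_iff.1 hq with hq | hq
          · have : q = p := by simpa using hq
            subst this
            exact divC_not_dvd hp2 hrest
          · exact fun hd => hkeys q hq (hd.trans divC_dvd)
        obtain ⟨h1, h2, h3⟩ := ih (d.insert p (divC p rest).2) (divC p rest).1
          (fun q hq => hl2 q (by simp [hq])) hr' hnd' hfresh' hkeys'
        refine ⟨?_, h2, h3⟩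
        rw [h1, PySem.Dict.items_insert_of_not_contains d _ hfp]
        simp [pairsOf, hc]
      · rw [if_neg hc]
        have hkeys' : ∀ q, d.contains q = true → ¬ q ∣ (divC p rest).1 :=
          fun q hq hd => hkeys q hq (hd.trans divC_dvd)
        obtain ⟨h1, h2, h3⟩ := ih d (divC p rest).1
          (fun q hq => hl2 q (by simp [hq])) hr' hnd' (fun q hq => hfresh q (by simp [hq])) hkeys'
        refine ⟨?_, h2, h3⟩
        rw [h1]
        simp [pairsOf, hc]

theorem pyRange_pairwise_ne (a b : Int) : (PySem.List.pyRange a b).Pairwise (· ≠ ·) := by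
  have H : ∀ (k : Nat) (a : Int), (b - a).toNat ≤ k → (PySem.List.pyRange a b).Pairwise (· ≠ ·) := by
    intro k
    induction k with
    | zero =>
        intro a h
        have hnil : PySem.List.pyRange a b = [] := by
          rw [List.eq_nil_iff_forall_not_mem]
          intro x hx
          have := PySem.List.mem_pyRange_one.1 hx
          omega
        rw [hnil]
        exact List.Pairwise.nil
    | succ k ih =>
        intro a h
        by_cases hab : a < b
        · rw [PySem.List.pyRange_one_cons hab]
          refine List.pairwise_cons.2 ⟨?_, ih (a + 1) (by omega)⟩
          intro x hx
          have := PySem.List.mem_pyRange_one.1 hx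
          omega
        · have hnil : PySem.List.pyRange a b = [] := by
            rw [List.eq_nil_iff_forall_not_mem]
            intro x hx
            have := PySem.List.mem_pyRange_one.1 hx
            omega
          rw [hnil]
          exact List.Pairwise.nil
  exact H (b - a).toNat a (le_refl _)

-- ---------- checkA characterisation ----------
theorem checkA_all {n m : Int} {L : List (Int × Int)}
    (h : ∀ pc ∈ L, ¬ legA n pc.1 pc.1 < pc.2) :
    checkA n m L = PySem.Int.toStr m ++ " divides " ++ PySem.Int.toStr n ++ "!" := by
  induction L with
  | nil => rfl
  | cons pc rest ih =>
      obtain ⟨p, c⟩ := pc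
      show checkA n m ((p, c) :: rest) = _
      rw [checkA, if_neg (h (p, c) (by simp))]
      exact ih (fun x hx => h x (by simp [hx]))

theorem checkA_ex {n m : Int} {L : List (Int × Int)}
    (h : ∃ pc ∈ L, legA n pc.1 pc.1 < pc.2) :
    checkA n m L = PySem.Int.toStr m ++ " does not divide " ++ PySem.Int.toStr n ++ "!" := by
  induction L with
  | nil => simp at h
  | cons pc rest ih =>
      obtain ⟨p, c⟩ := pc
      show checkA n m ((p, c) :: rest) = _
      rw [checkA]
      by_cases hh : legA n p p < c
      · rw [if_pos hh]
      · rw [if_neg hh]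
        apply ih
        obtain ⟨x, hx, hlt⟩ := h
        rcases List.mem_cons.1 hx with he | ht
        · subst he; exact absurd hlt hh
        · exact ⟨x, ht, hlt⟩

-- ---------- Legendre: legA / legB / nat version ----------
def legB (p t : Int) : Int :=
  if h : 2 ≤ p ∧ 0 < t then
    let t' := PySem.Int.floordiv t p
    t' + legB p t'
  else 0
termination_by t.toNat
decreasing_by exact pvFdivLt t p h.1 h.2

def legN (p t : Nat) : Nat :=
  if h : 2 ≤ p ∧ 0 < t then t / p + legN p (t / p) else 0
termination_by t
decreasing_by exact Nat.div_lt_self h.2 (by omega)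

theorem legB_pos {p t : Int} (h : 2 ≤ p ∧ 0 < t) :
    legB p t = PySem.Int.floordiv t p + legB p (PySem.Int.floordiv t p) := by
  conv_lhs => rw [legB]
  rw [dif_pos h]

theorem legB_neg {p t : Int} (h : ¬ (2 ≤ p ∧ 0 < t)) : legB p t = 0 := by
  rw [legB, dif_neg h]

theorem legA_eq (n p : Int) (hn : 0 < n) (hp : 2 ≤ p) (pot : Int) (hpot : 1 ≤ pot) :
    legA n p pot = PySem.Int.floordiv n pot + legB p (PySem.Int.floordiv n pot) := by
  fun_induction legA n p pot with
  | case1 pot h ih =>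
      have hpp : (1 : Int) ≤ pot * p := by nlinarith
      have hpotpos : (0 : Int) < pot := by omega
      have hdd : PySem.Int.floordiv n (pot * p)
          = PySem.Int.floordiv (PySem.Int.floordiv n pot) p := by
        rw [PySem.Int.floordiv_eq_ediv_of_pos (show (0 : Int) < pot * p by nlinarith),
          PySem.Int.floordiv_eq_ediv_of_pos hpotpos,
          PySem.Int.floordiv_eq_ediv_of_pos (show (0 : Int) < p by omega),
          Int.ediv_ediv_of_nonneg (le_of_lt hpotpos)]
      have hq : 0 < PySem.Int.floordiv n pot := by
        have := (PySem.Int.le_floordiv_iff_mul_le (a := n) (b := pot) (q := 1) hpotpos).2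
          (by omega : 1 * pot ≤ n)
        omega
      show PySem.Int.floordiv n pot + legA n p (pot * p) = _
      rw [ih hpp, hdd, legB_pos ⟨hp, hq⟩]
  | case2 pot h =>
      have hnpot : ¬ pot ≤ n := fun hle => h ⟨hp, hpot, hle⟩
      have hz : PySem.Int.floordiv n pot = 0 := by
        rw [PySem.Int.floordiv_eq_ediv_of_pos (by omega)]
        exact Int.ediv_eq_zero_of_lt (by omega) (by omega)
      rw [hz, legB_neg (by omega)]
      omega

theorem legA_neg {n p pot : Int} (h : ¬ (2 ≤ p ∧ 1 ≤ pot ∧ pot ≤ n)) : legA n p pot = 0 := by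
  rw [legA, dif_neg h]

theorem legA_eq_legB (n p : Int) (hp : 2 ≤ p) : legA n p p = legB p n := by
  rcases le_or_gt n 0 with hn | hn
  · rw [legA_neg (by omega), legB_neg (by omega)]
  · rw [legA_eq n p hn hp p (by omega), legB_pos ⟨hp, hn⟩]

theorem legB_natCast (p : Nat) (hp : 2 ≤ p) (n : Int) :
    legB (p : Int) n = (legN p n.toNat : Int) := by
  have H : ∀ (k : Nat) (n : Int), n.toNat ≤ k → legB (p : Int) n = (legN p n.toNat : Int) := by
    intro k
    induction k with
    | zero =>
        intro n hn
        rw [legB_neg (by omega), legN, dif_neg (by omega)]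
        rfl
    | succ k ih =>
        intro n hn
        by_cases h : 0 < n
        · have hcast : n = (n.toNat : Int) := by omega
          have hlt : n.toNat / p < n.toNat := Nat.div_lt_self (by omega) (by omega)
          rw [legB_pos ⟨by exact_mod_cast hp, h⟩]
          rw [hcast, PySem.Int.floordiv_natCast]
          rw [ih ((n.toNat / p : Nat) : Int) (by simp only [Int.toNat_natCast]; omega)]
          simp only [Int.toNat_natCast]
          conv_rhs => rw [legN, dif_pos ⟨hp, by omega⟩]
          push_cast
          ring
        · rw [legB_neg (by omega), legN, dif_neg (by omega)]
          rfl
  exact H n.toNat n (le_refl _)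

-- v_p(N!) = N/p + v_p((N/p)!)
theorem fac_factorial_rec (p : Nat) (hp : p.Prime) (N : Nat) :
    (Nat.factorial N).factorization p = N / p + (Nat.factorial (N / p)).factorization p := by
  have hlog : Nat.log p (N / p) ≤ Nat.log p N := Nat.log_mono_right (Nat.div_le_self N p)
  rw [Nat.factorization_factorial hp (show Nat.log p N < Nat.log p N + 2 by omega),
      Nat.factorization_factorial hp (show Nat.log p (N / p) < Nat.log p N + 1 by omega)]
  rw [Finset.sum_eq_sum_Ico_succ_bot (by omega) (fun i => N / p ^ i), pow_one]
  congr 1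
  rw [Finset.sum_Ico_eq_sum_range, Finset.sum_Ico_eq_sum_range]
  have hb : Nat.log p N + 2 - (1 + 1) = Nat.log p N + 1 - 1 := by omega
  rw [hb]
  apply Finset.sum_congr rfl
  intro j _
  rw [Nat.div_div_eq_div_mul]
  congr 1
  ring

theorem legN_eq_factorization (p : Nat) (hp : p.Prime) (N : Nat) :
    legN p N = (Nat.factorial N).factorization p := by
  have H : ∀ (k : Nat) (N : Nat), N ≤ k → legN p N = (Nat.factorial N).factorization p := by
    intro k
    induction k with
    | zero =>
        intro N hN
        have : N = 0 := by omega
        subst this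
        rw [legN, dif_neg (by omega)]
        simp
    | succ k ih =>
        intro N hN
        by_cases h : 0 < N
        · rw [legN, dif_pos ⟨hp.two_le, h⟩, fac_factorial_rec p hp N]
          congr 1
          exact ih _ (by have := Nat.div_lt_self h (hp.one_lt); omega)
        · have : N = 0 := by omega
          subst this
          rw [legN, dif_neg (by omega)]
          simp
  exact H N N (le_refl _)

-- ---------- trial-division invariant: the recorded pairs are the prime factorization ----------
theorem pairs_inv (s' : Int) :
    ∀ (a rest : Int), 2 ≤ a → 1 ≤ rest →
    (∀ q : Int, 2 ≤ q → q < a → ¬ q ∣ rest) →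
    (∀ pc ∈ pairsOf (PySem.List.pyRange a s') rest,
        a ≤ pc.1 ∧ pc.1 < s' ∧ Nat.Prime pc.1.toNat ∧ 1 ≤ pc.2)
    ∧ (pairsOf (PySem.List.pyRange a s') rest).Pairwise (fun x y => x.1 < y.1)
    ∧ prodPC (pairsOf (PySem.List.pyRange a s') rest) * restOf (PySem.List.pyRange a s') rest
        = rest
    ∧ 1 ≤ restOf (PySem.List.pyRange a s') rest
    ∧ (∀ q : Int, 2 ≤ q → q < max a s' → ¬ q ∣ restOf (PySem.List.pyRange a s') rest) := by
  have H : ∀ (k : Nat) (a rest : Int), (s' - a).toNat ≤ k → 2 ≤ a → 1 ≤ rest →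
      (∀ q : Int, 2 ≤ q → q < a → ¬ q ∣ rest) →
      (∀ pc ∈ pairsOf (PySem.List.pyRange a s') rest,
          a ≤ pc.1 ∧ pc.1 < s' ∧ Nat.Prime pc.1.toNat ∧ 1 ≤ pc.2)
      ∧ (pairsOf (PySem.List.pyRange a s') rest).Pairwise (fun x y => x.1 < y.1)
      ∧ prodPC (pairsOf (PySem.List.pyRange a s') rest) * restOf (PySem.List.pyRange a s') rest
          = rest
      ∧ 1 ≤ restOf (PySem.List.pyRange a s') rest
      ∧ (∀ q : Int, 2 ≤ q → q < max a s' → ¬ q ∣ restOf (PySem.List.pyRange a s') rest) := by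
    intro k
    induction k with
    | zero =>
        intro a rest hfuel ha hrest hnodiv
        have hnil : PySem.List.pyRange a s' = [] := PySem.List.pyRange_one_eq_nil (by omega)
        rw [hnil]
        refine ⟨by simp [pairsOf], by simp [pairsOf], ?_, ?_, ?_⟩
        · show prodPC [] * rest = rest
          simp [prodPC]
        · exact hrest
        · intro q hq2 hqlt
          exact hnodiv q hq2 (by omega)
    | succ k ih =>
        intro a rest hfuel ha hrest hnodiv
        by_cases hlt : a < s'
        · rw [PySem.List.pyRange_one_cons hlt]
          have hr' : 0 < (divC a rest).1 := divC_pos (by omega)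
          have hdvd : (divC a rest).1 ∣ rest := divC_dvd
          have hnd : ¬ a ∣ (divC a rest).1 := divC_not_dvd ha (by omega)
          have hmul : a ^ (divC a rest).2.toNat * (divC a rest).1 = rest := divC_mul ha
          have hnodiv' : ∀ q : Int, 2 ≤ q → q < a + 1 → ¬ q ∣ (divC a rest).1 := by
            intro q hq2 hqlt hqd
            rcases lt_or_eq_of_le (by omega : q ≤ a) with h | h
            · exact hnodiv q hq2 h (hqd.trans hdvd)
            · subst h; exact hnd hqd
          obtain ⟨ih1, ih2, ih3, ih4, ih5⟩ :=
            ih (a + 1) (divC a rest).1 (by omega) (by omega) (by omega) hnodiv'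
          have hrest5 : ∀ q : Int, 2 ≤ q → q < max a s' →
              ¬ q ∣ restOf (PySem.List.pyRange (a+1) s') (divC a rest).1 := by
            intro q hq2 hqlt
            exact ih5 q hq2 (by omega)
          by_cases hc : 0 < (divC a rest).2
          · have haprime : Nat.Prime a.toNat := by
              have ha2 : 2 ≤ a.toNat := by omega
              have hfp : (Nat.minFac a.toNat).Prime := Nat.minFac_prime (by omega)
              have hfd : (Nat.minFac a.toNat : Int) ∣ a := by
                have : (Nat.minFac a.toNat : Int) ∣ (a.toNat : Int) :=
                  Int.natCast_dvd_natCast.2 (Nat.minFac_dvd _)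
                rwa [Int.toNat_of_nonneg (by omega)] at this
              have hfle : Nat.minFac a.toNat ≤ a.toNat := Nat.minFac_le (by omega)
              rcases lt_or_eq_of_le hfle with h | h
              · exfalso
                refine hnodiv (Nat.minFac a.toNat) (by exact_mod_cast hfp.two_le) (by omega)
                  (hfd.trans (divC_dvd_self hc))
              · exact Nat.prime_def_minFac.2 ⟨ha2, h⟩
            constructor
            · intro pc hpc
              simp only [pairsOf, restOf, if_pos hc, List.cons_append, List.nil_append, List.mem_cons] at hpc
              rcases hpc with h | h
              · subst h
                exact ⟨le_refl a, hlt, haprime, by omega⟩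
              · obtain ⟨h1, h2, h3, h4⟩ := ih1 pc h
                exact ⟨by omega, h2, h3, h4⟩
            refine ⟨?_, ?_, ih4, hrest5⟩
            · simp only [pairsOf, restOf, if_pos hc, List.cons_append, List.nil_append]
              refine List.pairwise_cons.2 ⟨?_, ih2⟩
              intro y hy
              have := (ih1 y hy).1
              omega
            · simp only [pairsOf, restOf, if_pos hc, List.cons_append, List.nil_append]
              show (a ^ (divC a rest).2.toNat * prodPC _) * _ = rest
              rw [mul_assoc, ih3, hmul]
          · have hz : (divC a rest).2 = 0 := by
              have := divC_snd_nonneg a rest; omega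
            have hre : (divC a rest).1 = rest := divC_snd_zero hz
            simp only [pairsOf, restOf, if_neg hc, List.nil_append]
            refine ⟨?_, ih2, by rw [ih3, hre], ih4, hrest5⟩
            intro pc hpc
            obtain ⟨h1, h2, h3, h4⟩ := ih1 pc hpc
            exact ⟨by omega, h2, h3, h4⟩
        · have hnil : PySem.List.pyRange a s' = [] := PySem.List.pyRange_one_eq_nil (by omega)
          rw [hnil]
          refine ⟨by simp [pairsOf], by simp [pairsOf], ?_, hrest, ?_⟩
          · show prodPC [] * rest = rest
            simp [prodPC]
          · intro q hq2 hqlt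
            exact hnodiv q hq2 (by omega)
  intro a rest ha hrest hnodiv
  exact H (s' - a).toNat a rest (le_refl _) ha hrest hnodiv


-- ---------- gcd sweep: list form, nat shadow and characterisation ----------
def sweepL : List Int → Int → Int
  | [], r => r
  | k :: ks, r =>
      let r' := PySem.Int.floordiv r (Int.gcd r k)
      if r' = 1 then r' else sweepL ks r'

theorem bSweep_eq_sweepL (stop : Int) :
    ∀ (k r : Int), bSweep stop k r = sweepL (PySem.List.pyRange k stop) r := by
  have H : ∀ (f : Nat) (k r : Int), (stop - k).toNat ≤ f →
      bSweep stop k r = sweepL (PySem.List.pyRange k stop) r := by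
    intro f
    induction f with
    | zero =>
        intro k r hf
        rw [bSweep, dif_neg (by omega), PySem.List.pyRange_one_eq_nil (by omega)]
        rfl
    | succ f ih =>
        intro k r hf
        by_cases hk : k < stop
        · rw [bSweep, dif_pos hk, PySem.List.pyRange_one_cons hk]
          show _ = sweepL (k :: PySem.List.pyRange (k + 1) stop) r
          rw [sweepL]
          by_cases h1 : PySem.Int.floordiv r (Int.gcd r k) = 1
          · simp [h1]
          · simp only [if_neg h1]
            exact ih (k + 1) _ (by omega)
        · rw [bSweep, dif_neg hk, PySem.List.pyRange_one_eq_nil (by omega)]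
          rfl
  exact fun k r => H (stop - k).toNat k r (le_refl _)

def sweepN : List Nat → Nat → Nat
  | [], r => r
  | k :: ks, r =>
      let r' := r / Nat.gcd r k
      if r' = 1 then 1 else sweepN ks r'

theorem sweepL_natCast (l : List Nat) (r : Nat) (hr : 1 ≤ r) :
    sweepL (l.map Int.ofNat) (r : Int) = (sweepN l r : Int) := by
  induction l generalizing r with
  | nil => rfl
  | cons k ks ih =>
      simp only [List.map_cons, Int.ofNat_eq_natCast, sweepL]
      have hg : Int.gcd (r : Int) (k : Int) = Nat.gcd r k := by
        simp [Int.gcd]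
      rw [hg, PySem.Int.floordiv_natCast]
      have hgd : 0 < Nat.gcd r k := Nat.gcd_pos_of_pos_left k hr
      have hq : 1 ≤ r / Nat.gcd r k :=
        (Nat.one_le_div_iff hgd).2 (Nat.le_of_dvd hr (Nat.gcd_dvd_left r k))
      show (if ((r / Nat.gcd r k : Nat) : Int) = 1 then ((r / Nat.gcd r k : Nat) : Int)
        else sweepL (ks.map _) ((r / Nat.gcd r k : Nat) : Int)) = _
      by_cases h1 : r / Nat.gcd r k = 1
      · rw [if_pos (by exact_mod_cast congrArg (fun x : Nat => (x : Int)) h1)]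
        rw [sweepN]
        simp [h1]
      · rw [if_neg (by exact_mod_cast fun hx : ((r / Nat.gcd r k : Nat) : Int) = 1 => h1 (by exact_mod_cast hx))]
        rw [ih _ hq, sweepN]
        simp [h1]

-- gcd over a product splits through successive quotients (valuation argument)
theorem gcd_mul_split (m B C : Nat) (hm : m ≠ 0) (hB : B ≠ 0) (hC : C ≠ 0) :
    Nat.gcd m (B * C) = Nat.gcd m B * Nat.gcd (m / Nat.gcd m B) C := by
  have hg : Nat.gcd m B ≠ 0 := Nat.gcd_ne_zero_left hm
  have hdvd : Nat.gcd m B ∣ m := Nat.gcd_dvd_left m B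
  have hq : m / Nat.gcd m B ≠ 0 := by
    intro h0
    have := Nat.div_mul_cancel hdvd
    rw [h0, zero_mul] at this
    exact hm this.symm
  have h2 : Nat.gcd (m / Nat.gcd m B) C ≠ 0 := fun h0 => hC (Nat.eq_zero_of_gcd_eq_zero_right h0)
  apply Nat.eq_of_factorization_eq (Nat.gcd_ne_zero_left hm) (mul_ne_zero hg h2)
  intro q
  rw [Nat.factorization_gcd hm (mul_ne_zero hB hC), Nat.factorization_mul hB hC,
    Nat.factorization_mul hg h2, Nat.factorization_gcd hm hB,
    Nat.factorization_gcd hq hC, Nat.factorization_div hdvd,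
    Nat.factorization_gcd hm hB]
  simp only [Finsupp.inf_apply, Finsupp.add_apply, Finsupp.tsub_apply]
  omega

theorem sweepN_eq (l : List Nat) :
    ∀ r : Nat, 0 < r → (∀ k ∈ l, 0 < k) → sweepN l r = r / Nat.gcd r l.prod := by
  induction l with
  | nil =>
      intro r hr _
      show r = r / Nat.gcd r 1
      rw [Nat.gcd_one_right, Nat.div_one]
  | cons k ks ih =>
      intro r hr hpos
      have hP : 0 < ks.prod := List.prod_pos (fun x hx => hpos x (by simp [hx]))
      have hg : 0 < Nat.gcd r k := Nat.gcd_pos_of_pos_left k hr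
      have hgd : Nat.gcd r k ∣ r := Nat.gcd_dvd_left r k
      have hq : 0 < r / Nat.gcd r k := (Nat.one_le_div_iff hg).2 (Nat.le_of_dvd hr hgd)
      show (if r / Nat.gcd r k = 1 then 1 else sweepN ks (r / Nat.gcd r k)) = _
      rw [List.prod_cons]
      by_cases h1 : r / Nat.gcd r k = 1
      · rw [if_pos h1]
        have hrk : r = Nat.gcd r k := by
          conv_lhs => rw [← Nat.div_mul_cancel hgd, h1, one_mul]
        have hrdvd : r ∣ k * ks.prod := Dvd.dvd.mul_right (hrk ▸ Nat.gcd_dvd_right r k) _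
        rw [Nat.gcd_eq_left hrdvd, Nat.div_self hr]
      · rw [if_neg h1, ih _ hq (fun x hx => hpos x (by simp [hx]))]
        rw [gcd_mul_split r k ks.prod (by omega) (fun h0 => by have := hpos k (by simp); omega) (by omega)]
        rw [Nat.div_div_eq_div_mul]

-- ---------- assembling: both sides decide m.toNat ∣ (n.toNat)! ----------
theorem prodPC_natCast (L : List (Int × Int)) (h : ∀ pc ∈ L, 0 ≤ pc.1) :
    prodPC L = Int.ofNat ((L.map (fun pc => pc.1.toNat ^ pc.2.toNat)).prod) := by
  induction L with
  | nil => rfl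
  | cons pc rest ih =>
      obtain ⟨p, c⟩ := pc
      show p ^ c.toNat * prodPC rest = _
      rw [ih (fun x hx => h x (by simp [hx]))]
      have hp : (0 : Int) ≤ p := h (p, c) (by simp)
      rw [List.map_cons, List.prod_cons]
      simp only [Int.ofNat_eq_natCast]
      push_cast [Int.toNat_of_nonneg hp]
      ring

theorem coprime_list_prod (x : Nat) (xs : List Nat) (h : ∀ y ∈ xs, Nat.Coprime x y) :
    Nat.Coprime x xs.prod := by
  induction xs with
  | nil => simp [Nat.Coprime]
  | cons y ys ih =>
      rw [List.prod_cons]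
      exact Nat.Coprime.mul_right (h y (by simp)) (ih fun z hz => h z (by simp [hz]))

theorem coprime_prod_dvd (K : List Nat) (t : Nat) (hcp : K.Pairwise Nat.Coprime)
    (h : ∀ x ∈ K, x ∣ t) : K.prod ∣ t := by
  induction K with
  | nil => simpa using one_dvd t
  | cons x xs ih =>
      obtain ⟨hx, hcp'⟩ := List.pairwise_cons.1 hcp
      rw [List.prod_cons]
      exact Nat.Coprime.mul_dvd_of_dvd_of_dvd (coprime_list_prod x xs hx) (h x (by simp))
        (ih hcp' (fun z hz => h z (by simp [hz])))


theorem prodPC_append (L1 L2 : List (Int × Int)) :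
    prodPC (L1 ++ L2) = prodPC L1 * prodPC L2 := by
  induction L1 with
  | nil => simp [prodPC]
  | cons pc rest ih =>
      obtain ⟨p, c⟩ := pc
      show p ^ c.toNat * prodPC (rest ++ L2) = (p ^ c.toNat * prodPC rest) * prodPC L2
      rw [ih]
      ring

theorem rangeProd (t : Nat) :
    ((List.range t).map (fun k => 2 + k)).prod = Nat.factorial (t + 1) := by
  induction t with
  | zero => rfl
  | succ t ih =>
      rw [List.range_succ, List.map_append, List.prod_append, ih]
      show Nat.factorial (t + 1) * ((2 + t) * 1) = Nat.factorial (t + 2)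
      rw [mul_one, Nat.factorial_succ (t + 1)]
      ring

-- ===== VERDICT (by name: the statement is the Claim_ definition above) =====
theorem divides_or_not_spec : Claim_equal_divides_or_not := by
  intro n m hdom hpre
  unfold Spec_divides_or_not divides_or_not divides_or_not_alt
  by_cases h0 : m = 0
  · rw [if_pos h0, if_pos h0]
  by_cases h1 : m = 1
  · rw [if_neg h0, if_neg h0, if_pos h1, if_pos h1]
  rw [if_neg h0, if_neg h0, if_neg h1, if_neg h1]
  have hm2 : 2 ≤ m := by
    have : (0 : Int) ≤ m := hpre
    omega
  have hs'eq : pyIntSqrt m + 1 = (Nat.sqrt m.toNat : Int) + 1 := rfl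
  have hsqrt1 : 1 ≤ Nat.sqrt m.toNat := Nat.le_sqrt.2 (by omega)
  have hl2 : ∀ p ∈ PySem.List.pyRange 2 (pyIntSqrt m + 1), 2 ≤ p :=
    fun p hp => (PySem.List.mem_pyRange_one.1 hp).1
  -- A-side: the dict's items are the trial-division pairs plus the leftover
  obtain ⟨h1i, h2i, h3i⟩ := foldA (PySem.List.pyRange 2 (pyIntSqrt m + 1))
    PySem.Dict.empty m hl2 (by omega) (pyRange_pairwise_ne _ _)
    (fun p _ => PySem.Dict.contains_empty p)
    (fun q hq => absurd hq (by simp [PySem.Dict.contains_empty]))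
  have hitems : (factoriza m).items
      = pairsOf (PySem.List.pyRange 2 (pyIntSqrt m + 1)) m
        ++ (if 1 < restOf (PySem.List.pyRange 2 (pyIntSqrt m + 1)) m
            then [(restOf (PySem.List.pyRange 2 (pyIntSqrt m + 1)) m, 1)] else []) := by
    unfold factoriza
    have hemp : (PySem.Dict.empty : PySem.Dict Int Int).items = [] := rfl
    set st := (PySem.List.pyRange 2 (pyIntSqrt m + 1)).foldl
      (fun st i => facWhile i st.1 st.2) (PySem.Dict.empty, m) with hst
    by_cases hlt : 1 < st.2
    · rw [if_pos hlt]
      have hfr : st.1.contains st.2 = false := by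
        by_contra hcon
        have := h3i st.2 (by revert hcon; cases h : st.1.contains st.2 <;> simp)
        rw [h2i] at this
        exact this (dvd_refl _)
      rw [PySem.Dict.items_insert_of_not_contains _ _ hfr, h1i, h2i, if_pos (h2i ▸ hlt)]
      simp [hemp]
    · rw [if_neg hlt, h1i, if_neg (h2i ▸ hlt)]
      simp [hemp]
  -- the trial-division invariant
  obtain ⟨hP1, hP2, hP3, hP4, hP5⟩ := pairs_inv (pyIntSqrt m + 1) 2 m (le_refl 2) (by omega)
    (fun q hq2 hqlt _ => by omega)
  have hP5' : ∀ q : Int, 2 ≤ q → q < pyIntSqrt m + 1 →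
      ¬ q ∣ restOf (PySem.List.pyRange 2 (pyIntSqrt m + 1)) m :=
    fun q h2 hlt => hP5 q h2 (by omega)
  have hRdvd : restOf (PySem.List.pyRange 2 (pyIntSqrt m + 1)) m ∣ m :=
    ⟨prodPC (pairsOf (PySem.List.pyRange 2 (pyIntSqrt m + 1)) m), by rw [mul_comm]; exact hP3.symm⟩
  have hRfacts : 1 < restOf (PySem.List.pyRange 2 (pyIntSqrt m + 1)) m →
      Nat.Prime (restOf (PySem.List.pyRange 2 (pyIntSqrt m + 1)) m).toNat
        ∧ pyIntSqrt m + 1 ≤ restOf (PySem.List.pyRange 2 (pyIntSqrt m + 1)) m := by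
    intro hR1
    set R := restOf (PySem.List.pyRange 2 (pyIntSqrt m + 1)) m with hRdef
    have hRle : R ≤ m := Int.le_of_dvd (by omega) hRdvd
    constructor
    · have hfp := Nat.minFac_prime (show R.toNat ≠ 1 by omega)
      have hfdR : ((Nat.minFac R.toNat : Nat) : Int) ∣ R := by
        have : ((Nat.minFac R.toNat : Nat) : Int) ∣ ((R.toNat : Nat) : Int) :=
          Int.natCast_dvd_natCast.2 (Nat.minFac_dvd _)
        rwa [Int.toNat_of_nonneg (by omega)] at this
      by_contra hnp
      have hsq := Nat.minFac_sq_le_self (by omega : 0 < R.toNat) hnp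
      rw [pow_two] at hsq
      have hle : Nat.minFac R.toNat ≤ Nat.sqrt m.toNat := Nat.le_sqrt.2 (by omega)
      exact hP5' (Nat.minFac R.toNat) (by exact_mod_cast hfp.two_le)
        (by rw [hs'eq]; exact_mod_cast by omega) hfdR
    · by_contra hRs
      exact hP5' R (by omega) (by omega) (dvd_refl R)
  -- collected facts about the item list
  have hIfacts : ∀ pc ∈ (factoriza m).items, 2 ≤ pc.1 ∧ Nat.Prime pc.1.toNat ∧ 1 ≤ pc.2 := by
    intro pc hpc
    rw [hitems] at hpc
    rcases List.mem_append.1 hpc with h | h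
    · obtain ⟨ha, hb, hc, hd⟩ := hP1 pc h
      exact ⟨by omega, hc, hd⟩
    · by_cases hR1 : 1 < restOf (PySem.List.pyRange 2 (pyIntSqrt m + 1)) m
      · rw [if_pos hR1] at h
        obtain ⟨hpr, hge⟩ := hRfacts hR1
        have : pc = (restOf (PySem.List.pyRange 2 (pyIntSqrt m + 1)) m, 1) := by simpa using h
        subst this
        refine ⟨by simpa [hs'eq] using hge.trans' (by omega), hpr, by omega⟩
      · rw [if_neg hR1] at h
        simp at h
  have hIpw : ((factoriza m).items).Pairwise (fun x y => x.1 < y.1) := by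
    rw [hitems]
    rw [List.pairwise_append]
    refine ⟨hP2, ?_, ?_⟩
    · by_cases hR1 : 1 < restOf (PySem.List.pyRange 2 (pyIntSqrt m + 1)) m
      · rw [if_pos hR1]; simp
      · rw [if_neg hR1]; simp
    · intro x hx y hy
      by_cases hR1 : 1 < restOf (PySem.List.pyRange 2 (pyIntSqrt m + 1)) m
      · rw [if_pos hR1] at hy
        have hys : y = (restOf (PySem.List.pyRange 2 (pyIntSqrt m + 1)) m, 1) := by simpa using hy
        subst hys
        have := (hP1 x hx).2.1
        have := (hRfacts hR1).2
        show x.1 < restOf (PySem.List.pyRange 2 (pyIntSqrt m + 1)) m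
        omega
      · rw [if_neg hR1] at hy
        simp at hy
  have hIprod : prodPC ((factoriza m).items) = m := by
    rw [hitems, prodPC_append]
    by_cases hR1 : 1 < restOf (PySem.List.pyRange 2 (pyIntSqrt m + 1)) m
    · rw [if_pos hR1]
      simp only [prodPC, Int.toNat_one, pow_one, mul_one]
      exact hP3
    · rw [if_neg hR1]
      simp only [prodPC, mul_one]
      have hRone : restOf (PySem.List.pyRange 2 (pyIntSqrt m + 1)) m = 1 := by omega
      have h := hP3
      rw [hRone, mul_one] at h
      exact h
  -- the prime-power list over ℕ
  have hKprod : (((factoriza m).items).map (fun pc => pc.1.toNat ^ pc.2.toNat)).prod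
      = m.toNat := by
    have h := prodPC_natCast ((factoriza m).items) (fun pc hpc => by have := (hIfacts pc hpc).1; omega)
    rw [hIprod] at h
    simp only [Int.ofNat_eq_natCast] at h
    omega
  have hKcp : ((((factoriza m).items).map (fun pc => pc.1.toNat ^ pc.2.toNat))).Pairwise
      Nat.Coprime := by
    rw [List.pairwise_map]
    refine List.Pairwise.imp_of_mem ?_ hIpw
    intro a b ha hb hlt
    refine Nat.Coprime.pow _ _ ((Nat.coprime_primes (hIfacts a ha).2.1 (hIfacts b hb).2.1).2 ?_)
    have := (hIfacts a ha).1
    have := (hIfacts b hb).1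
    omega
  -- per-item Legendre condition = prime-power divisibility of n!
  have per_item : ∀ pc ∈ (factoriza m).items,
      (¬ legA n pc.1 pc.1 < pc.2 ↔ pc.1.toNat ^ pc.2.toNat ∣ Nat.factorial n.toNat) := by
    intro pc hpc
    obtain ⟨hp2, hprime, hc1⟩ := hIfacts pc hpc
    have hcast : pc.1 = ((pc.1.toNat : Nat) : Int) := by omega
    rw [Nat.Prime.pow_dvd_iff_le_factorization hprime (Nat.factorial_ne_zero n.toNat),
      legA_eq_legB n pc.1 hp2, hcast, legB_natCast pc.1.toNat (by omega) n,
      legN_eq_factorization _ hprime]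
    simp only [Int.toNat_natCast]
    omega
  have hiff : (∀ pc ∈ (factoriza m).items, ¬ legA n pc.1 pc.1 < pc.2)
      ↔ m.toNat ∣ Nat.factorial n.toNat := by
    constructor
    · intro hall
      have hdd : ∀ x ∈ (((factoriza m).items).map (fun pc => pc.1.toNat ^ pc.2.toNat)),
          x ∣ Nat.factorial n.toNat := by
        intro x hx
        obtain ⟨pc, hpc, rfl⟩ := List.mem_map.1 hx
        exact (per_item pc hpc).1 (hall pc hpc)
      have := coprime_prod_dvd _ _ hKcp hdd
      rwa [hKprod] at this
    · intro hdv pc hpc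
      refine (per_item pc hpc).2 (dvd_trans ?_ hdv)
      rw [← hKprod]
      exact List.dvd_prod (List.mem_map_of_mem hpc)
  -- B-side: the gcd sweep decides the same divisibility
  have hfact : Nat.factorial ((n + 1 - 2).toNat + 1) = Nat.factorial n.toNat := by
    by_cases hn1 : 1 ≤ n
    · congr 1
      omega
    · have ht : (n + 1 - 2).toNat = 0 := by omega
      have hN : n.toNat = 0 := by omega
      rw [ht, hN]
      rfl
  have hrange : PySem.List.pyRange 2 (n + 1)
      = ((List.range ((n + 1 - 2).toNat)).map (fun k => 2 + k)).map Int.ofNat := by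
    rw [PySem.List.pyRange_one, List.map_map]
    refine List.map_congr_left ?_
    intro k _
    show (2 : Int) + (k : Int) = Int.ofNat (2 + k)
    simp only [Int.ofNat_eq_natCast]
    push_cast
    ring
  have hswB : bSweep (n + 1) 2 m
      = ((sweepN ((List.range ((n + 1 - 2).toNat)).map (fun k => 2 + k)) m.toNat : Nat) : Int) := by
    rw [bSweep_eq_sweepL, hrange, show (m : Int) = ((m.toNat : Nat) : Int) from by omega]
    exact sweepL_natCast _ _ (by omega)
  have hsw_iff : sweepN ((List.range ((n + 1 - 2).toNat)).map (fun k => 2 + k)) m.toNat = 1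
      ↔ m.toNat ∣ Nat.factorial n.toNat := by
    rw [sweepN_eq _ _ (by omega)
      (fun k hk => by obtain ⟨j, _, rfl⟩ := List.mem_map.1 hk; omega)]
    rw [rangeProd, hfact]
    constructor
    · intro hone
      have hgM : Nat.gcd m.toNat (Nat.factorial n.toNat) ∣ m.toNat := Nat.gcd_dvd_left _ _
      have hMg : m.toNat = Nat.gcd m.toNat (Nat.factorial n.toNat) := by
        conv_lhs => rw [← Nat.div_mul_cancel hgM, hone, one_mul]
      rw [hMg]
      exact Nat.gcd_dvd_right _ _
    · intro hdvF
      rw [Nat.gcd_eq_left hdvF, Nat.div_self (by omega)]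
  -- conclude, by cases on the one divisibility fact both sides decide
  by_cases hdv : m.toNat ∣ Nat.factorial n.toNat
  · rw [checkA_all (hiff.2 hdv), if_pos (by rw [hswB, hsw_iff.2 hdv]; rfl)]
  · have hex : ∃ pc ∈ (factoriza m).items, legA n pc.1 pc.1 < pc.2 := by
      by_contra hno
      push_neg at hno
      exact hdv (hiff.1 (fun pc hpc => not_lt.2 (hno pc hpc)))
    rw [checkA_ex hex, if_neg (fun hone => hdv (hsw_iff.1 (by
      rw [hswB] at hone
      exact_mod_cast hone)))]
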